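-- pv_equiv track=rewrite | github.com/raja9112/Python | Zoho Interview/convert_array.py | convert_array
-- ===== SOURCE A (Python) =====
-- def convert_array(arr):
--     for i in range(len(arr)-1):
--         if arr[i] != 0 and arr[i] == arr[i+1]:
--             arr[i] *= 2
--             arr[i+1] = 0
--
--     # return [num for num in arr if num != 0] + [0] *arr.count(0)       # O(n) Space
--
--     pos = 0
--     # Space = O(1)
--     for i in range(len(arr)):
--         if arr[i] != 0:
--             arr[pos] = arr[i]
--
--             if i != pos:
--                 arr[i] = 0
--
--             pos += 1
--
--     return arr
-- ===== SOURCE B (Python) =====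
-- def convert_array(arr):
--     # same merge pass as A, then rebuild in place: non-zeros in order, padded with zeros
--     for i in range(len(arr)-1):
--         if arr[i] != 0 and arr[i] == arr[i+1]:
--             arr[i] *= 2
--             arr[i+1] = 0
--     arr[:] = [x for x in arr if x != 0] + [0] * arr.count(0)
--     return arr
-- ===== Notes on version B (the rewrite author's own statement) =====
-- stated objective: simpler
-- what changed: The manual two-pointer compaction loop (write index pos, conditional zeroing) is replaced by rebuilding the list as the non-zero elements in order followed by count-of-zeros zeros, assigned via arr[:] so the same object is mutated.
import Mathlib
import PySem

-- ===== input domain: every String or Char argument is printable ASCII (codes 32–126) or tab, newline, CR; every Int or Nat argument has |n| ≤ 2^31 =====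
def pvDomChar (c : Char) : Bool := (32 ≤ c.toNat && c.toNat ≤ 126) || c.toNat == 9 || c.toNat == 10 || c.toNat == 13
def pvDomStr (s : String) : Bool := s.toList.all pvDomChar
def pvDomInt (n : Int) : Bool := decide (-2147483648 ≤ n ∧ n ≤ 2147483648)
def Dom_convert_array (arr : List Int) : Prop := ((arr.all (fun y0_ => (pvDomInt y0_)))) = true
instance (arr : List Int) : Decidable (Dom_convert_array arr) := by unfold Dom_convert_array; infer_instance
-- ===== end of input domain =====

-- B replaces A's two-pointer compaction by "filter non-zeros, pad with zeros" (simpler);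
-- both Pythons mutate arr in place the same way, the theorems are about the returned value.

-- ===== PORT A =====
-- merge pass shared by both Pythons: for i in range(len(arr)-1): if arr[i]!=0 and arr[i]==arr[i+1] …
-- all indices are in range and nonnegative, so List.range / getD / set are exact here
def mergePass (arr : List Int) : List Int :=
  (List.range (arr.length - 1)).foldl
    (fun a i =>
      let ai := a.getD i 0
      let ai1 := a.getD (i + 1) 0
      if ai ≠ 0 ∧ ai = ai1 then (a.set i (ai * 2)).set (i + 1) 0 else a)
    arr

-- body of A's second loop: state (arr, pos)
def posStep (st : List Int × Nat) (i : Nat) : List Int × Nat :=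
  let a := st.1
  let pos := st.2
  let ai := a.getD i 0
  if ai ≠ 0 then
    let a1 := a.set pos ai
    let a2 := if i ≠ pos then a1.set i 0 else a1
    (a2, pos + 1)
  else st

def convert_array (arr : List Int) : List Int :=
  let a := mergePass arr
  ((List.range a.length).foldl posStep (a, 0)).1

-- ===== PORT B =====
def convert_array_alt (arr : List Int) : List Int :=
  let a := mergePass arr
  a.filter (fun x => x != 0) ++ List.replicate (a.count 0) 0

-- ===== PRECONDITION & SPEC =====
def Spec_convert_array (arr : List Int) (out : List Int) : Prop := out = convert_array_alt arr
instance (arr : List Int) (out : List Int) : Decidable (Spec_convert_array arr out) := by unfold Spec_convert_array; infer_instance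

-- ===== CLAIM (what is proved, stated in full; the proofs are below) =====
def Claim_equal_convert_array : Prop := ∀ (arr : List Int), Dom_convert_array arr → Spec_convert_array arr (convert_array arr)

-- ===== LEMMAS AND PROOFS =====

theorem set_at_len (K : List Int) (w v : Int) (T : List Int) :
    (K ++ (w :: T)).set K.length v = K ++ (v :: T) := by
  induction K with
  | nil => simp
  | cons k K ih => simp [ih]

theorem getD_at_len (K : List Int) (w : Int) (T : List Int) :
    (K ++ (w :: T)).getD K.length 0 = w := by
  induction K with
  | nil => simp
  | cons k K ih => simpa [List.getD] using ih

theorem getD_mid (K : List Int) (z : Nat) (v : Int) (S : List Int) :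
    (K ++ (List.replicate z 0 ++ v :: S)).getD (K.length + z) 0 = v := by
  have h := getD_at_len (K ++ List.replicate z 0) v S
  simpa [List.append_assoc] using h

theorem set_mid (K : List Int) (z : Nat) (w v : Int) (S : List Int) :
    (K ++ (List.replicate z 0 ++ w :: S)).set (K.length + z) v
      = K ++ (List.replicate z 0 ++ v :: S) := by
  have h := set_at_len (K ++ List.replicate z 0) w v S
  simpa [List.append_assoc] using h

-- invariant of A's compaction loop: having consumed the prefix (K = its non-zeros,
-- z zeros left behind), the fold over the remaining indices produces filter-then-pad
theorem loop_inv (S : List Int) : ∀ (K : List Int) (z : Nat),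
    (List.range' (K.length + z) S.length).foldl posStep
        (K ++ (List.replicate z 0 ++ S), K.length)
      = (K ++ (S.filter (fun x => x != 0) ++ List.replicate (z + S.count 0) 0),
         K.length + (S.filter (fun x => x != 0)).length) := by
  induction S with
  | nil => intro K z; simp
  | cons v S ih =>
    intro K z
    rw [List.length_cons, List.range'_succ, List.foldl_cons]
    by_cases hv : v = 0
    · subst hv
      have hstep : posStep (K ++ (List.replicate z 0 ++ 0 :: S), K.length) (K.length + z)
          = (K ++ (List.replicate z 0 ++ 0 :: S), K.length) := by
        simp [posStep, getD_mid]
      rw [hstep]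
      have harr : K ++ (List.replicate z 0 ++ 0 :: S)
          = K ++ (List.replicate (z + 1) 0 ++ S) := by
        simp [List.replicate_succ']
      rw [harr]
      have h := ih K (z + 1)
      have hidx : K.length + z + 1 = K.length + (z + 1) := by omega
      rw [hidx, h]
      simp [List.count_cons]
      omega
    · have hne : (v != 0) = true := by simp [hv]
      -- the step writes v at pos = K.length and (if z > 0) zeroes slot K.length + z
      have hstep : posStep (K ++ (List.replicate z 0 ++ v :: S), K.length) (K.length + z)
          = ((K ++ [v]) ++ (List.replicate z 0 ++ S), K.length + 1) := by
        cases z with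
        | zero =>
          simp only [posStep, getD_mid]
          have hset : (K ++ (List.replicate 0 0 ++ v :: S)).set K.length v
              = K ++ (v :: S) := by simpa using set_at_len K v v S
          simp [hv, hset]
        | succ z' =>
          simp only [posStep, getD_mid]
          have h1 : (K ++ (List.replicate (z' + 1) 0 ++ v :: S)).set K.length v
              = (K ++ [v]) ++ (List.replicate z' 0 ++ v :: S) := by
            have : List.replicate (z' + 1) 0 ++ v :: S
                = (0 : Int) :: (List.replicate z' 0 ++ v :: S) := by
              simp [List.replicate_succ]
            rw [this, set_at_len]
            simp
          have h2 : ((K ++ [v]) ++ (List.replicate z' 0 ++ v :: S)).set (K.length + (z' + 1)) 0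
              = (K ++ [v]) ++ (List.replicate z' 0 ++ (0 : Int) :: S) := by
            have hl : K.length + (z' + 1) = (K ++ [v]).length + z' := by simp; omega
            rw [hl, set_mid]
          have h3 : List.replicate z' 0 ++ (0 : Int) :: S
              = List.replicate (z' + 1) 0 ++ S := by
            simp [List.replicate_succ']
          have hne2 : K.length + (z' + 1) ≠ K.length := by omega
          simp [hv, hne2, h1, h2, h3]
      rw [hstep]
      have h := ih (K ++ [v]) z
      have hlen : (K ++ [v]).length = K.length + 1 := by simp
      rw [hlen] at h
      have hidx : K.length + z + 1 = K.length + 1 + z := by omega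
      rw [hidx, h]
      simp [hne, List.count_cons, hv, List.append_assoc]
      omega

theorem compact_eq (a : List Int) :
    ((List.range a.length).foldl posStep (a, 0)).1
      = a.filter (fun x => x != 0) ++ List.replicate (a.count 0) 0 := by
  have h := loop_inv a [] 0
  simp only [List.length_nil, List.replicate_zero, List.nil_append, Nat.add_zero,
    Nat.zero_add] at h
  rw [List.range_eq_range', h]

theorem convert_array_spec : Claim_equal_convert_array := by
  intro arr _
  show convert_array arr = convert_array_alt arr
  unfold convert_array convert_array_alt
  exact compact_eq (mergePass arr)
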